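-- pv_equiv track=rewrite | github.com/sinsniwal/iitm-server-bot | tools.py | house_test_A
-- ===== SOURCE A (Python) =====
-- def house_test_A(data_dict):
--     house_set={'Bandipur House', 'Corbett House', 'Gir House', 'Kanha House', 'Kaziranga House', 'Nallamala House', 'Namdapha House', 'Nilgiri House', 'Pichavaram House', 'Saranda House', 'Sundarbans House', 'Wayanad House'}
--     try:
--         for house in data_dict.values():
--             if house not in house_set:
--                 return False
--     except:
--         return False
--     return True
-- ===== SOURCE B (Python) =====
-- def house_test_A(data_dict):
--     houses = ['Bandipur House', 'Corbett House', 'Gir House', 'Kanha House', 'Kaziranga House', 'Nallamala House', 'Namdapha House', 'Nilgiri House', 'Pichavaram House', 'Saranda House', 'Sundarbans House', 'Wayanad House']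
--     try:
--         leftover = set(data_dict.values())
--     except:
--         return False
--     for h in houses:
--         leftover.discard(h)
--     return not leftover
-- ===== Notes on version B (the rewrite author's own statement) =====
-- stated objective: alternative
-- what changed: B inverts the traversal: it builds the set of dict values once, then loops over the twelve fixed house names discarding each from that set, and returns whether anything is left over - no per-value membership test against the house set and no early return.
import Mathlib
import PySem

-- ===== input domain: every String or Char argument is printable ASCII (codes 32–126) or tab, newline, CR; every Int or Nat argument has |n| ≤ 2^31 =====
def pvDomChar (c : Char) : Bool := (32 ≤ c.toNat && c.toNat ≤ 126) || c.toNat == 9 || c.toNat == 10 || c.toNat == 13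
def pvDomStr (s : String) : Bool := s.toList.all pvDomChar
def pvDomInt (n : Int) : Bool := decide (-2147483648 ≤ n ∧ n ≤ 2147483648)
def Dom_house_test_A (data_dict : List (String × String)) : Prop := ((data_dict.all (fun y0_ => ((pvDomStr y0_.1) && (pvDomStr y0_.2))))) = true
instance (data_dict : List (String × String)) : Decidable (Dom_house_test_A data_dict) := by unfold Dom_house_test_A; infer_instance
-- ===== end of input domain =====

-- B inverts the traversal: it builds the set of dict values once, then loops over the twelve fixed
-- house names discarding each from that set, and returns whether anything is left over (alternative).


-- the twelve house names (A builds a set of them; B loops over them as a list)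
def pvHouses : List String :=
  ["Bandipur House", "Corbett House", "Gir House", "Kanha House", "Kaziranga House", "Nallamala House", "Namdapha House", "Nilgiri House", "Pichavaram House", "Saranda House", "Sundarbans House", "Wayanad House"]

-- ===== PORT A =====
-- A's house_set literal
def pvHouseSetA : PySem.Set String := PySem.Set.ofList pvHouses

-- A's for-loop over the values with early 'return False'
def houseLoopA : List String → Bool
  | [] => true
  | house :: rest => if PySem.Set.contains pvHouseSetA house then houseLoopA rest else false

def house_test_A (data_dict : List (String × String)) : Bool :=
  houseLoopA (data_dict.map Prod.snd)

-- ===== PORT B =====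
-- leftover = set(data_dict.values()); for h in houses: leftover.discard(h); return not leftover
def house_test_A_alt (data_dict : List (String × String)) : Bool :=
  let leftover : PySem.Set String :=
    pvHouses.foldl PySem.Set.discard (PySem.Set.ofList (data_dict.map Prod.snd))
  leftover.isEmpty

-- ===== PRECONDITION & SPEC =====
def Spec_house_test_A (data_dict : List (String × String)) (out : Bool) : Prop := out = house_test_A_alt data_dict
instance (data_dict : List (String × String)) (out : Bool) : Decidable (Spec_house_test_A data_dict out) := by unfold Spec_house_test_A; infer_instance

-- ===== CLAIM =====
def Claim_equal_house_test_A : Prop := ∀ (data_dict : List (String × String)), Dom_house_test_A data_dict → Spec_house_test_A data_dict (house_test_A data_dict)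

-- ===== LEMMAS AND PROOFS =====
theorem houseLoopA_eq_forall (l : List String) :
    houseLoopA l = true ↔ ∀ x ∈ l, x ∈ pvHouses := by
  induction l with
  | nil => simp [houseLoopA]
  | cons h t ih =>
      by_cases hc : h ∈ pvHouses <;>
        simp [houseLoopA, hc, ih, pvHouseSetA, PySem.Set.mem_ofList]

theorem mem_foldl_discard (hs : List String) (s : PySem.Set String) (x : String) :
    x ∈ hs.foldl PySem.Set.discard s ↔ x ∈ s ∧ x ∉ hs := by
  induction hs generalizing s with
  | nil => simp
  | cons h t ih =>
      simp only [List.foldl_cons, ih, PySem.Set.mem_discard, List.mem_cons]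
      tauto

-- ===== VERDICT =====
theorem house_test_A_spec : Claim_equal_house_test_A := by
  intro data_dict _
  unfold Spec_house_test_A house_test_A house_test_A_alt
  rw [Bool.eq_iff_iff, houseLoopA_eq_forall, List.isEmpty_iff, List.eq_nil_iff_forall_not_mem]
  constructor
  · intro h x hx
    rw [mem_foldl_discard, PySem.Set.mem_ofList] at hx
    exact hx.2 (h x hx.1)
  · intro h x hx
    by_contra hn
    exact h x ((mem_foldl_discard _ _ _).mpr ⟨(PySem.Set.mem_ofList _ _).mpr hx, hn⟩)
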